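-- pv_equiv track=rewrite | github.com/lydianai/tsunami | modules/security_tools/waf_checker.py | unicode_encode
-- ===== SOURCE A (Python) =====
-- def unicode_encode(payload: str) -> str:
--     """Unicode encode special characters"""
--     result = ""
--     for char in payload:
--         if ord(char) > 127 or char in "<>\"'&/\\;":
--             result += "\\u{:04x}".format(ord(char))
--         else:
--             result += char
--     return result
-- ===== SOURCE B (Python) =====
-- _SPECIALS = set('<>"\'&/\\;')
--
-- def _safe(c: str) -> bool:
--     return ord(c) <= 127 and c not in _SPECIALS
--
-- def unicode_encode(payload: str) -> str:
--     """Unicode encode special characters"""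
--     # Run-based scan: copy each maximal run of safe characters as one slice,
--     # then escape the single offending character that ended the run.
--     parts = []
--     i, n = 0, len(payload)
--     while i < n:
--         j = i
--         while j < n and _safe(payload[j]):
--             j += 1
--         parts.append(payload[i:j])
--         if j < n:
--             parts.append("\\u{:04x}".format(ord(payload[j])))
--             j += 1
--         i = j
--     return "".join(parts)
-- ===== Notes on version B (the rewrite author's own statement) =====
-- stated objective: alternative
-- what changed: Replaced the per-character branch-and-concatenate loop with a run-based scan that copies each maximal run of safe characters as a single slice and only escapes the run-ending character, joining the collected parts once.
import Mathlib
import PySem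

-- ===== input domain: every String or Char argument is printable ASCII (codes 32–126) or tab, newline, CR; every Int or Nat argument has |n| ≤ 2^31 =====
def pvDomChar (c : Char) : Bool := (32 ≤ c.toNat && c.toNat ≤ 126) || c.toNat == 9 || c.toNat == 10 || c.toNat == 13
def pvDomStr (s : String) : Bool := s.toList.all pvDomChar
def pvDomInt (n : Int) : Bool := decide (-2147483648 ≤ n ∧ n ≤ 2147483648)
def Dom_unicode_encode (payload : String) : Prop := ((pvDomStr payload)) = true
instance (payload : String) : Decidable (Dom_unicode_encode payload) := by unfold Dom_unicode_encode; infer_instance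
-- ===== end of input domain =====

-- B: run-based scan (copy maximal safe runs as slices, escape run-enders, join once) instead of A's per-character branch-and-concatenate loop (alternative).

-- shared helper: "\\u{:04x}".format(n) (lowercase, 4 hex digits for n < 65536)
def pvHexDigit (n : Nat) : Char := if n < 10 then Char.ofNat (48 + n) else Char.ofNat (87 + n)
def pvEsc (n : Nat) : String :=
  "\\u" ++ String.ofList [pvHexDigit (n / 4096 % 16), pvHexDigit (n / 256 % 16),
                      pvHexDigit (n / 16 % 16), pvHexDigit (n % 16)]

-- ===== PORT A =====
def unicode_encode (payload : String) : String :=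
  payload.toList.foldl (fun result char =>
    if char.toNat > 127 || "<>\"'&/\\;".toList.contains char then
      result ++ pvEsc char.toNat
    else
      result ++ String.ofList [char]) ""

-- ===== PORT B =====
-- def _safe(c): return ord(c) <= 127 and c not in _SPECIALS
def pvSafe (c : Char) : Bool := c.toNat ≤ 127 && !("<>\"'&/\\;".toList.contains c)

-- the while loop of B: collect parts (safe run as one slice, then the escaped run-ender), recursing on the rest
def pvParts (l : List Char) : List String :=
  if l = [] then []
  else
    let run := l.takeWhile pvSafe
    match h : l.dropWhile pvSafe with
    | [] => [String.ofList run]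
    | c :: rest => String.ofList run :: pvEsc c.toNat :: pvParts rest
termination_by l.length
decreasing_by
  have h1 : (l.dropWhile pvSafe).length ≤ l.length := l.length_dropWhile_le pvSafe
  rw [h] at h1; simp at h1; omega

def unicode_encode_alt (payload : String) : String :=
  String.join (pvParts payload.toList)

-- ===== PRECONDITION & SPEC =====
def Spec_unicode_encode (payload : String) (out : String) : Prop := out = unicode_encode_alt payload
instance (payload : String) (out : String) : Decidable (Spec_unicode_encode payload out) := by unfold Spec_unicode_encode; infer_instance

-- ===== CLAIM (what is proved, stated in full; the proofs are below) =====
def Claim_equal_unicode_encode : Prop := ∀ (payload : String), Dom_unicode_encode payload → Spec_unicode_encode payload (unicode_encode payload)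

-- ===== LEMMAS AND PROOFS =====

-- A's fold with any accumulator
def pvFoldA (l : List Char) (acc : String) : String :=
  l.foldl (fun result char =>
    if char.toNat > 127 || "<>\"'&/\\;".toList.contains char then
      result ++ pvEsc char.toNat
    else
      result ++ String.ofList [char]) acc

theorem pvFoldA_append (a b : List Char) (acc : String) :
    pvFoldA (a ++ b) acc = pvFoldA b (pvFoldA a acc) := by
  simp [pvFoldA]

-- over a run of safe characters A just appends them
theorem pvFoldA_safe (a : List Char) (acc : String)
    (h : ∀ c ∈ a, pvSafe c = true) :
    pvFoldA a acc = acc ++ String.ofList a := by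
  induction a generalizing acc with
  | nil => simp [pvFoldA]
  | cons c a ih =>
      have hc := h c (List.mem_cons_self ..)
      have hns : ¬(c.toNat > 127 || "<>\"'&/\\;".toList.contains c) = true := by
        simp [pvSafe] at hc ⊢; omega
      simp only [pvFoldA, List.foldl_cons, if_neg hns]
      rw [show (List.foldl _ (acc ++ String.ofList [c]) a : String) = pvFoldA a (acc ++ String.ofList [c]) from rfl,
          ih _ (fun x hx => h x (List.mem_cons_of_mem _ hx)),
          String.append_assoc, ← String.ofList_append]
      simp

theorem pvJoin_cons (s : String) (l : List String) :
    String.join (s :: l) = s ++ String.join l := by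
  simp [String.join]
  induction l generalizing s with
  | nil => simp
  | cons t l ih => simp only [List.foldl_cons]; rw [ih (s ++ t), ih ("" ++ t)]; simp [String.append_assoc]

-- main invariant: A's fold equals acc ++ join of B's parts
theorem pvFoldA_parts (l : List Char) (acc : String) :
    pvFoldA l acc = acc ++ String.join (pvParts l) := by
  by_cases hl : l = []
  · simp [hl, pvFoldA, pvParts, String.join]
  · have hsplit : l.takeWhile pvSafe ++ l.dropWhile pvSafe = l := l.takeWhile_append_dropWhile
    have hrun : ∀ c ∈ l.takeWhile pvSafe, pvSafe c = true :=
      fun c hc => List.mem_takeWhile_imp hc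
    rw [pvParts]
    simp only [if_neg hl]
    cases hd : l.dropWhile pvSafe with
    | nil =>
        rw [hd] at hsplit; simp at hsplit
        have ht : l.takeWhile pvSafe = l := by
          rw [List.takeWhile_eq_self_iff]; exact fun a ha => hsplit a ha
        rw [pvFoldA_safe l acc hsplit, ht]
        simp [String.join]
    | cons c rest =>
        have hc : pvSafe c = false := by
          have := List.head?_dropWhile_not pvSafe l
          rw [hd] at this; simpa using this
        have hlen : rest.length < l.length := by
          have h1 : (l.dropWhile pvSafe).length ≤ l.length := l.length_dropWhile_le pvSafe
          rw [hd] at h1; simp at h1; omega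
        have hesc : (c.toNat > 127 || "<>\"'&/\\;".toList.contains c) = true := by
          rw [Bool.or_eq_true]
          by_cases hcc : ("<>\"'&/\\;".toList.contains c) = true
          · exact Or.inr hcc
          · rw [Bool.not_eq_true] at hcc
            left
            rw [pvSafe, hcc] at hc
            simp at hc ⊢; omega
        conv_lhs => rw [← hsplit, hd]
        rw [pvFoldA_append, pvFoldA_safe _ _ hrun]
        rw [show pvFoldA (c :: rest) (acc ++ String.ofList (l.takeWhile pvSafe))
              = pvFoldA rest ((acc ++ String.ofList (l.takeWhile pvSafe)) ++ pvEsc c.toNat) from by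
            simp only [pvFoldA, List.foldl_cons, if_pos hesc]]
        rw [pvFoldA_parts rest]
        simp [pvJoin_cons, String.append_assoc]
termination_by l.length

-- ===== VERDICT (by name: the statement is the Claim_ definition above) =====
theorem unicode_encode_spec : Claim_equal_unicode_encode := by
  intro payload _
  unfold Spec_unicode_encode unicode_encode unicode_encode_alt
  rw [show (payload.toList.foldl _ "" : String) = pvFoldA payload.toList "" from rfl, pvFoldA_parts]
  simp
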